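-- pv_equiv track=rewrite | github.com/SkanderHannachi/geneticsudoku | sudoku.py | Metrique_ligne
-- ===== SOURCE A (Python) =====
-- def Metrique_ligne(l) :
--     """Permet de calculer la métrique de la partition de la ligne à partir d'une solution selectionnée."""
--     G = lambda ls,x : len([i for i,val in enumerate(ls) if val==x or val==x+10])  ##Nombre d'occurences dans une seule ligne.
--     Sl= 0
--     for v in range(1,10) :
--         for i in range(9) :
--             if G(l[i],v) == 0 :
--                 cc = 1
--             else :
--                 cc = G(l[i],v)
--             Sl += (cc - 1)**2
--     return Sl
-- ===== SOURCE B (Python) =====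
-- def Metrique_ligne(l):
--     """Row-partition metric: one counting pass per row instead of nine rescans."""
--     Sl = 0
--     for i in range(9):
--         counts = {}
--         for cell in l[i]:
--             if 1 <= cell <= 9:
--                 n = cell
--             elif 11 <= cell <= 19:
--                 n = cell - 10
--             else:
--                 continue
--             counts[n] = counts.get(n, 0) + 1
--         for c in counts.values():
--             Sl += (c - 1) ** 2
--     return Sl
-- ===== Notes on version B (the rewrite author's own statement) =====
-- stated objective: alternative
-- what changed: Replaces A's nine full rescans of every row (one G() scan per value v, and G is even evaluated twice per cell) by a single counting pass per row that builds a dict of normalized-value counts and then sweeps the counts once.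
import Mathlib
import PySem

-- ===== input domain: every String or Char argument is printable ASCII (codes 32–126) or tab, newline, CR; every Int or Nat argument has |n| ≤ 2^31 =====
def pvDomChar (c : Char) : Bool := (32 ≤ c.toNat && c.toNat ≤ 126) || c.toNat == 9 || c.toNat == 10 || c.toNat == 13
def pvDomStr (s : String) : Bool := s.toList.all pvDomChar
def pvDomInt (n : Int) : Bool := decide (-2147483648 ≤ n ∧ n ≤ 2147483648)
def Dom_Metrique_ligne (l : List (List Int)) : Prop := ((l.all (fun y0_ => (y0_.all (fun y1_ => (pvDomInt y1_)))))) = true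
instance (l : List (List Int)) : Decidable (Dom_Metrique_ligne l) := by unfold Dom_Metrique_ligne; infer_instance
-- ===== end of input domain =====

-- B replaces A's nine rescans of every row (one per value v) by a single counting
-- pass per row (a dict of normalized-value counts) followed by a sweep of the counts.

-- ===== PORT A =====
-- G(ls, x) = len([i for i,val in enumerate(ls) if val==x or val==x+10])
def pvG (ls : List Int) (x : Int) : Int :=
  (((PySem.List.enumerate ls).filter (fun p => p.2 == x || p.2 == x + 10)).length : Int)

def Metrique_ligne (l : List (List Int)) : Int :=
  (PySem.List.pyRange 1 10 1).foldl (fun Sl v =>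
    (PySem.List.pyRange 0 9 1).foldl (fun Sl i =>
      let row := PySem.List.pyGetD l i []   -- l[i]; in range by Pre_
      let cc := if pvG row v == 0 then 1 else pvG row v
      Sl + (cc - 1) ^ 2) Sl) 0

-- ===== PORT B =====
-- normalization used by B's single pass: 1..9 ↦ itself, 11..19 ↦ −10, else skipped
def pvNorm (cell : Int) : Option Int :=
  if 1 ≤ cell ∧ cell ≤ 9 then some cell
  else if 11 ≤ cell ∧ cell ≤ 19 then some (cell - 10) else none

def pvRowMetric (row : List Int) : Int :=
  let counts := row.foldl (fun d cell =>
      match pvNorm cell with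
      | some n => d.insert n (d.getD n 0 + 1)
      | none => d) (PySem.Dict.empty : PySem.Dict Int Int)
  counts.values.foldl (fun s c => s + (c - 1) ^ 2) 0

def Metrique_ligne_alt (l : List (List Int)) : Int :=
  (PySem.List.pyRange 0 9 1).foldl (fun Sl i =>
    Sl + pvRowMetric (PySem.List.pyGetD l i [])) 0

-- ===== PRECONDITION & SPEC =====
-- A indexes l[0]..l[8], so both programs raise IndexError when len(l) < 9.
def Pre_Metrique_ligne (l : List (List Int)) : Prop := 9 ≤ l.length
instance (l : List (List Int)) : Decidable (Pre_Metrique_ligne l) := by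
  unfold Pre_Metrique_ligne; infer_instance

def pvWitness_Metrique_ligne : List (List Int) :=
  [[1, 1, 2], [11, 1], [], [3], [4, 14], [5], [6], [7, 20], [9, 10]]

def Spec_Metrique_ligne (l : List (List Int)) (out : Int) : Prop := out = Metrique_ligne_alt l
instance (l : List (List Int)) (out : Int) : Decidable (Spec_Metrique_ligne l out) := by
  unfold Spec_Metrique_ligne; infer_instance

-- ===== CLAIM (what is proved, stated in full; the proofs are below) =====
def Claim_equal_Metrique_ligne : Prop := ∀ (l : List (List Int)), Dom_Metrique_ligne l → Pre_Metrique_ligne l → Spec_Metrique_ligne l (Metrique_ligne l)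

-- ===== LEMMAS AND PROOFS =====

-- the normalized multiset of a row
def pvNs (row : List Int) : List Int := row.filterMap pvNorm

lemma foldl_add_int {α : Type} (l : List α) (g : α → Int) (a : Int) :
    l.foldl (fun acc x => acc + g x) a = a + (l.map g).sum := by
  induction l generalizing a with
  | nil => simp
  | cons x t ih => simp [List.foldl_cons, ih (a + g x)]; ring

lemma sum_map_add_int {β : Type} (L : List β) (a b : β → Int) :
    (L.map (fun i => a i + b i)).sum = (L.map a).sum + (L.map b).sum := by
  induction L with
  | nil => simp
  | cons x t ih => simp [ih]; ring

lemma sum_map_add_swap {α β : Type} (L1 : List α) (L2 : List β) (g : α → β → Int) :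
    (L1.map (fun v => (L2.map (g v)).sum)).sum
      = (L2.map (fun i => (L1.map (fun v => g v i)).sum)).sum := by
  induction L1 with
  | nil => simp
  | cons v t ih =>
      simp only [List.sum_cons, ih, List.map, sum_map_add_int]

lemma len_aux (v : Int) (h1 : 1 ≤ v) (h2 : v ≤ 9) :
    ∀ (ls : List Int) (s : Int),
      ((PySem.List.enumerate ls s).filter (fun p => p.2 == v || p.2 == v + 10)).length
        = (pvNs ls).count v := by
  intro ls
  induction ls with
  | nil => intro s; simp [PySem.List.enumerate_nil, pvNs]
  | cons c t ih =>
      intro s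
      rw [PySem.List.enumerate_cons, List.filter_cons]
      cases hq : ((c == v || c == v + 10) : Bool) with
      | true =>
          have hcv : c = v ∨ c = v + 10 := by
            rcases Bool.or_eq_true_iff.mp hq with h | h
            · exact Or.inl (beq_iff_eq.mp h)
            · exact Or.inr (beq_iff_eq.mp h)
          have hnorm : pvNorm c = some v := by
            unfold pvNorm
            rcases hcv with h | h <;> subst h
            · rw [if_pos ⟨h1, h2⟩]
            · rw [if_neg (by omega), if_pos (by omega)]
              congr 1
              omega
          have hns : pvNs (c :: t) = v :: pvNs t := by
            simp [pvNs, hnorm]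
          simp only [if_true, hns, List.length_cons, List.count_cons_self, ih (s + 1)]
      | false =>
          have hc1 : ¬ c = v := by intro h; subst h; simp at hq
          have hc2 : ¬ c = v + 10 := by intro h; subst h; simp at hq
          have hc1' : ¬ v = c := fun h => hc1 h.symm
          have hcount : (pvNs (c :: t)).count v = (pvNs t).count v := by
            simp only [pvNs, List.filterMap_cons]
            unfold pvNorm
            split_ifs with hA hB
            · simp [hc1]
            · have hne : ¬ v = c - 10 := by omega
              have hne' : ¬ c - 10 = v := by omega
              simp [hne']
            · rfl
          simp only [Bool.false_eq_true, if_false, ih (s + 1), hcount]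

-- A's G(ls, v) counts, for 1 ≤ v ≤ 9, exactly the occurrences of v in the normalized row
lemma pvG_eq_count (row : List Int) (v : Int) (h1 : 1 ≤ v) (h2 : v ≤ 9) :
    pvG row v = ((pvNs row).count v : Int) := by
  unfold pvG
  rw [len_aux v h1 h2 row 0]

lemma mem_pvNs_bounds {row : List Int} {k : Int} (h : k ∈ pvNs row) : 1 ≤ k ∧ k ≤ 9 := by
  simp only [pvNs, List.mem_filterMap] at h
  obtain ⟨a, _, ha⟩ := h
  unfold pvNorm at ha
  split_ifs at ha with hA hB
  all_goals simp only [Option.some.injEq] at ha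
  all_goals omega

lemma foldl_norm (row : List Int) (d : PySem.Dict Int Int) :
    row.foldl (fun d cell =>
      match pvNorm cell with
      | some n => d.insert n (d.getD n 0 + 1)
      | none => d) d
    = (pvNs row).foldl (fun d n => d.insert n (d.getD n 0 + 1)) d := by
  induction row generalizing d with
  | nil => simp [pvNs]
  | cons c t ih =>
      cases h : pvNorm c <;> simp [pvNs, h, ih]

lemma pvRowMetric_eq (row : List Int) :
    pvRowMetric row
      = ((PySem.Set.ofList (pvNs row)).map
          (fun k => (((pvNs row).count k : Int) - 1) ^ 2)).sum := by
  unfold pvRowMetric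
  rw [foldl_norm, PySem.Dict.foldl_insert_getD_add_one_eq_counter]
  rw [foldl_add_int _ (fun c => (c - 1) ^ 2)]
  simp only [PySem.Dict.values, PySem.Dict.items_counter, List.map_map, zero_add]
  apply congrArg
  apply List.map_congr_left
  intro k _
  rfl

lemma sum_nodup_subset {α : Type} [DecidableEq α] (L S : List α) (h g : α → Int)
    (hL : L.Nodup) (hS : S.Nodup) (hsub : ∀ x ∈ S, x ∈ L)
    (h0 : ∀ x ∈ L, x ∉ S → h x = 0) (hg : ∀ x ∈ S, h x = g x) :
    (L.map h).sum = (S.map g).sum := by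
  have hss : S.toFinset ⊆ L.toFinset := by
    intro x hx
    simp only [List.mem_toFinset] at *
    exact hsub x hx
  calc (L.map h).sum = L.toFinset.sum h := (List.sum_toFinset _ hL).symm
    _ = S.toFinset.sum h :=
        (Finset.sum_subset hss
          (fun x hx hxs => h0 x (by simpa using hx) (by simpa using hxs))).symm
    _ = S.toFinset.sum g := Finset.sum_congr rfl (fun x hx => hg x (by simpa using hx))
    _ = (S.map g).sum := List.sum_toFinset _ hS

-- per-row: A's nine counts of a row sum to B's table sweep of the same row
lemma row_lemma (row : List Int) :
    ((PySem.List.pyRange 1 10 1).map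
      (fun v => ((if pvG row v == 0 then 1 else pvG row v) - 1) ^ 2)).sum
    = pvRowMetric row := by
  have hr : PySem.List.pyRange 1 10 1 = [1, 2, 3, 4, 5, 6, 7, 8, 9] := by decide
  rw [pvRowMetric_eq, hr]
  apply sum_nodup_subset
  · decide
  · exact PySem.Set.nodup_ofList _
  · intro x hx
    have hb := mem_pvNs_bounds ((PySem.Set.mem_ofList _ _).mp hx)
    have h1 := hb.1; have h2 := hb.2
    interval_cases x <;> simp
  · intro x hxL hx
    have hc : (pvNs row).count x = 0 := by
      rw [List.count_eq_zero]
      intro hmem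
      exact hx ((PySem.Set.mem_ofList _ _).mpr hmem)
    have hb : 1 ≤ x ∧ x ≤ 9 := by
      simp only [List.mem_cons, List.not_mem_nil, or_false] at hxL
      omega
    rw [pvG_eq_count row x hb.1 hb.2, hc]
    simp
  · intro x hx
    have hb := mem_pvNs_bounds ((PySem.Set.mem_ofList _ _).mp hx)
    have hc : (pvNs row).count x ≠ 0 := by
      rw [Ne, List.count_eq_zero]
      intro hmem
      exact hmem ((PySem.Set.mem_ofList _ _).mp hx)
    rw [pvG_eq_count row x hb.1 hb.2]
    have hbe : (((pvNs row).count x : Int) == 0) = false := by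
      simp only [beq_eq_false_iff_ne, Ne]
      exact_mod_cast hc
    simp [hbe]

-- ===== VERDICT (by name: the statement is the Claim_ definition above) =====
theorem Metrique_ligne_spec : Claim_equal_Metrique_ligne := by
  intro l _ _
  unfold Spec_Metrique_ligne Metrique_ligne Metrique_ligne_alt
  simp only []   -- zeta-reduce the lets
  simp only [foldl_add_int, zero_add]
  rw [sum_map_add_swap]
  apply congrArg
  apply List.map_congr_left
  intro i _
  exact row_lemma (PySem.List.pyGetD l i [])
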